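-- pv_equiv track=rewrite | github.com/iur-ia/iuria | scraper/sistemas/base_sistema.py | detect_new_andamentos
-- ===== SOURCE A (Python) =====
-- def detect_new_andamentos(
--     antigos: list[dict], novos: list[dict]
-- ) -> list[dict]:
--     """Compara listas de andamentos e retorna os novos"""
--     antigos_set = set()
--     for a in antigos:
--         key = f"{a.get('data','')}|{a.get('descricao','')}"
--         antigos_set.add(key)
--
--     novos_detectados = []
--     for n in novos:
--         key = f"{n.get('data','')}|{n.get('descricao','')}"
--         if key not in antigos_set:
--             novos_detectados.append(n)
--
--     return novos_detectados
-- ===== SOURCE B (Python) =====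
-- def detect_new_andamentos(
--     antigos: list[dict], novos: list[dict]
-- ) -> list[dict]:
--     """Compara listas de andamentos e retorna os novos"""
--     restantes = list(novos)
--     for a in antigos:
--         key_a = f"{a.get('data','')}|{a.get('descricao','')}"
--         restantes = [
--             n for n in restantes
--             if f"{n.get('data','')}|{n.get('descricao','')}" != key_a
--         ]
--     return restantes
-- ===== Notes on version B (the rewrite author's own statement) =====
-- stated objective: alternative
-- what changed: Inverts the traversal: instead of indexing antigos' keys in a set and filtering novos once, B iterates over antigos and successively filters the surviving novos list, removing every candidate whose key matches the current antigo; no key set is ever built.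
import Mathlib
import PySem

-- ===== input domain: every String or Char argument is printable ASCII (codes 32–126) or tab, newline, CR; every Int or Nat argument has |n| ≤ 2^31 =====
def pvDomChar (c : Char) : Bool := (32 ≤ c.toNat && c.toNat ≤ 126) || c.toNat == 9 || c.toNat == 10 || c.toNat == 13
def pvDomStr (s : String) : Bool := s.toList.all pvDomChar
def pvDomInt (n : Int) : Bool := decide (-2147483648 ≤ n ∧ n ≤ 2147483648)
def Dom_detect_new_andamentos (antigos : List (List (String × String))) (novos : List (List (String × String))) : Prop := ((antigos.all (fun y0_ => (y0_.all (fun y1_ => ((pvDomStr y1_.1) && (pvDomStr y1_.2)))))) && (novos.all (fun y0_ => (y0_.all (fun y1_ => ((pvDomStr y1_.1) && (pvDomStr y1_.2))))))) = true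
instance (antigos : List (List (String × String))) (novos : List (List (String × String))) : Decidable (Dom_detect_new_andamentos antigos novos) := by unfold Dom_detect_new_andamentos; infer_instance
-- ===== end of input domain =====

-- B inverts the traversal: it never builds A's key set, but folds over antigos, successively
-- filtering the surviving novos by the current antigo's key; return values proved equal.

-- key shared by both ports: f"{d.get('data','')}|{d.get('descricao','')}"
def pvKey (d : List (String × String)) : String :=
  (PySem.Dict.mk d).getD "data" "" ++ "|" ++ (PySem.Dict.mk d).getD "descricao" ""

-- ===== PORT A =====
def detect_new_andamentos (antigos : List (List (String × String))) (novos : List (List (String × String))) : List (List (String × String)) :=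
  let antigos_set : PySem.Set String :=
    antigos.foldl (fun s a => PySem.Set.add s (pvKey a)) PySem.Set.empty
  novos.foldl (fun acc n => if PySem.Set.contains antigos_set (pvKey n) then acc else acc ++ [n]) []

-- ===== PORT B =====
def detect_new_andamentos_alt (antigos : List (List (String × String))) (novos : List (List (String × String))) : List (List (String × String)) :=
  antigos.foldl (fun restantes a => restantes.filter (fun n => pvKey n != pvKey a)) novos

-- ===== PRECONDITION & SPEC =====
def Spec_detect_new_andamentos (antigos : List (List (String × String))) (novos : List (List (String × String))) (out : List (List (String × String))) : Prop := out = detect_new_andamentos_alt antigos novos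
instance (antigos : List (List (String × String))) (novos : List (List (String × String))) (out : List (List (String × String))) : Decidable (Spec_detect_new_andamentos antigos novos out) := by unfold Spec_detect_new_andamentos; infer_instance

-- ===== CLAIM (what is proved, stated in full; the proofs are below) =====
def Claim_equal_detect_new_andamentos : Prop := ∀ (antigos : List (List (String × String))) (novos : List (List (String × String))), Dom_detect_new_andamentos antigos novos → Spec_detect_new_andamentos antigos novos (detect_new_andamentos antigos novos)

-- ===== LEMMAS AND PROOFS =====

-- membership in the folded-up key set = some antigo has that key
lemma contains_fold_add (antigos : List (List (String × String))) (s : PySem.Set String) (k : String) :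
    PySem.Set.contains (antigos.foldl (fun s a => PySem.Set.add s (pvKey a)) s) k
      = (PySem.Set.contains s k || antigos.any (fun a => pvKey a == k)) := by
  induction antigos generalizing s with
  | nil => simp
  | cons a rest ih =>
    simp only [List.foldl_cons, ih, List.any_cons]
    by_cases h : pvKey a = k
    · simp [h, PySem.Set.mem_add]
    · simp [PySem.Set.mem_add, h, Ne.symm h, Bool.or_left_comm]

-- A's accumulator loop is a filter
lemma foldl_append_filter (c : List (String × String) → Bool)
    (novos acc : List (List (String × String))) :
    novos.foldl (fun acc n => if c n then acc else acc ++ [n]) acc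
      = acc ++ novos.filter (fun n => !c n) := by
  induction novos generalizing acc with
  | nil => simp
  | cons n rest ih =>
    simp only [List.foldl_cons, List.filter_cons]
    by_cases h : c n
    · simp [h, ih]
    · simp [h, ih]

-- B's repeated filtering is one filter by "no antigo has this key"
lemma foldl_filter_all (antigos l : List (List (String × String))) :
    antigos.foldl (fun restantes a => restantes.filter (fun n => pvKey n != pvKey a)) l
      = l.filter (fun n => antigos.all (fun a => pvKey n != pvKey a)) := by
  induction antigos generalizing l with
  | nil => simp
  | cons a rest ih =>
    rw [List.foldl_cons, ih, List.filter_filter]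
    apply List.filter_congr
    intro n _
    by_cases h : pvKey n = pvKey a <;> simp [List.all_cons, h, Bool.and_comm]

-- "no antigo's key equals k" written as all-bne = negated any-beq
lemma not_any_eq_all (rest : List (List (String × String))) (k : String) :
    (!rest.any fun a => pvKey a == k) = rest.all fun a => k != pvKey a := by
  induction rest with
  | nil => simp
  | cons a r ih =>
    simp only [List.any_cons, List.all_cons, Bool.not_or, ih]
    congr 1
    by_cases h : pvKey a = k
    · simp [h]
    · simp [bne, h, Ne.symm h]

-- ===== VERDICT (by name: the statement is the Claim_ definition above) =====
theorem detect_new_andamentos_spec : Claim_equal_detect_new_andamentos := by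
  intro antigos novos _
  unfold Spec_detect_new_andamentos detect_new_andamentos detect_new_andamentos_alt
  rw [foldl_append_filter, foldl_filter_all]
  simp only [List.nil_append]
  apply List.filter_congr
  intro n _
  rw [contains_fold_add]
  simp [PySem.Set.empty, PySem.Set.contains, not_any_eq_all]
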